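-- pv_equiv track=rewrite | github.com/pokerdio/generic | e/e-189.py | foo
-- ===== SOURCE A (Python) =====
-- def foo(rgb):
--     if not rgb:
--         yield "r"
--         yield "g"
--         yield "b"
--
--     else:
--         for s in foo(rgb[1:]):
--             for i in "rgb":
--                 for j in "rgb":
--                     if i != j and j != rgb[0] and j != s[0]:
--                         yield i + j + s
-- ===== SOURCE B (Python) =====
-- def foo(rgb):
--     # Iterative rebuild of the recursion: process characters of rgb from last
--     # to first, maintaining the list of suffix strings; the 6 ordered pairs
--     # with i != j are precomputed once.
--     pairs = [(i, j) for i in "rgb" for j in "rgb" if i != j]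
--     current = ["r", "g", "b"]
--     for k in range(len(rgb) - 1, -1, -1):
--         c = rgb[k]
--         current = [i + j + s for s in current for (i, j) in pairs
--                    if j != c and j != s[0]]
--     for s in current:
--         yield s
-- ===== Notes on version B (the rewrite author's own statement) =====
-- stated objective: alternative
-- what changed: Replaces the recursive generator by an iterative bottom-up construction: a worklist of suffix strings is rebuilt once per character of rgb (scanned last-to-first), with the six i!=j letter pairs precomputed once instead of filtered in a nested 3x3 loop at every step.
import Mathlib
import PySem

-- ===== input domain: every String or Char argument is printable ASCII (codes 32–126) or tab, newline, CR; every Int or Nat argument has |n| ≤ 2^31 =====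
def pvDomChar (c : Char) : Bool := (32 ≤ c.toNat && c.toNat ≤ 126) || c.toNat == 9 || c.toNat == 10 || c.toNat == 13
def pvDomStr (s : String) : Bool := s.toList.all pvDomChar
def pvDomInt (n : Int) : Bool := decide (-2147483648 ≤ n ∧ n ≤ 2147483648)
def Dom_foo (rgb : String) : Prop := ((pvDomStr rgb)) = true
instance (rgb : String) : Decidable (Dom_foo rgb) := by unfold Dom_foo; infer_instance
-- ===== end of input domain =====

-- B rebuilds the generator iteratively (worklist per character, scanned
-- last-to-first, with the six i≠j pairs precomputed) instead of recursing;
-- equal yield sequence proved for all inputs.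

-- ===== PORT A =====
-- recursion over the character list of rgb; s[0] is ported as headD (every
-- produced string is nonempty, so Python's s[0] never raises)
def fooCore : List Char → List (List Char)
  | [] => [['r'], ['g'], ['b']]
  | c :: rest =>
    (fooCore rest).flatMap (fun s =>
      ['r', 'g', 'b'].flatMap (fun i =>
        ['r', 'g', 'b'].filterMap (fun j =>
          if i ≠ j ∧ j ≠ c ∧ j ≠ s.headD ' ' then some (i :: j :: s) else none)))

def foo (rgb : String) : List String := (fooCore rgb.toList).map String.ofList

-- ===== PORT B =====
-- the precomputed ordered pairs with i ≠ j
def altPairs : List (Char × Char) :=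
  ['r', 'g', 'b'].flatMap (fun i =>
    ['r', 'g', 'b'].filterMap (fun j => if i ≠ j then some (i, j) else none))

-- one pass of the worklist rebuild for character c
def altStep (c : Char) (cur : List (List Char)) : List (List Char) :=
  cur.flatMap (fun s =>
    altPairs.filterMap (fun p =>
      if p.2 ≠ c ∧ p.2 ≠ s.headD ' ' then some (p.1 :: p.2 :: s) else none))

def foo_alt (rgb : String) : List String :=
  ((rgb.toList.reverse).foldl (fun cur c => altStep c cur)
    [['r'], ['g'], ['b']]).map String.ofList

-- ===== PRECONDITION & SPEC =====
def Spec_foo (rgb : String) (out : List String) : Prop := out = foo_alt rgb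
instance (rgb : String) (out : List String) : Decidable (Spec_foo rgb out) := by unfold Spec_foo; infer_instance

-- ===== CLAIM (what is proved, stated in full; the proofs are below) =====
def Claim_equal_foo : Prop := ∀ (rgb : String), Dom_foo rgb → Spec_foo rgb (foo rgb)

-- ===== LEMMAS AND PROOFS =====

-- one step of A's recursion equals one worklist pass of B, per suffix string
set_option maxHeartbeats 1000000 in
theorem inner_eq (c : Char) (s : List Char) :
    (['r', 'g', 'b'].flatMap (fun i =>
      ['r', 'g', 'b'].filterMap (fun j =>
        if i ≠ j ∧ j ≠ c ∧ j ≠ s.headD ' ' then some (i :: j :: s) else none)))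
    = altPairs.filterMap (fun p =>
        if p.2 ≠ c ∧ p.2 ≠ s.headD ' ' then some (p.1 :: p.2 :: s) else none) := by
  simp only [altPairs, List.flatMap_cons, List.flatMap_nil, List.filterMap_cons,
    List.filterMap_nil, ne_eq, List.append_nil]
  simp only [Char.reduceEq, not_false_eq_true, true_and, not_true, false_and,
    if_false, if_true, List.cons_append, List.nil_append, List.filterMap_cons]
  split_ifs <;> rfl

theorem step_eq (c : Char) (cur : List (List Char)) :
    cur.flatMap (fun s =>
      ['r', 'g', 'b'].flatMap (fun i =>
        ['r', 'g', 'b'].filterMap (fun j =>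
          if i ≠ j ∧ j ≠ c ∧ j ≠ s.headD ' ' then some (i :: j :: s) else none)))
    = altStep c cur := by
  unfold altStep
  exact List.flatMap_congr (fun s _ => inner_eq c s)

theorem core_eq (l : List Char) :
    fooCore l = l.foldr (fun c cur => altStep c cur) [['r'], ['g'], ['b']] := by
  induction l with
  | nil => rfl
  | cons c rest ih =>
    simp only [fooCore, List.foldr_cons, ih, step_eq]

-- ===== VERDICT (by name: the statement is the Claim_ definition above) =====
theorem foo_spec : Claim_equal_foo := by
  intro rgb _
  unfold Spec_foo foo foo_alt
  rw [List.foldl_reverse, core_eq]
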